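-- pv_equiv track=rewrite | github.com/novayo/LeetCode | 1447_Simplified_Fractions/try_4.py | simplifiedFractions
-- ===== SOURCE A (Python) =====
-- from typing import List
--
-- def simplifiedFractions(n: int) -> List[str]:
--     def gcd(x, y):
--         while y:
--             x, y = y, x%y
--         return x
--
--     ans = []
--     for i in range(2, n+1):
--         for j in range(1, i):
--             if gcd(i, j) == 1:
--                 ans.append(f'{j}/{i}')
--     return ans
-- ===== SOURCE B (Python) =====
-- from typing import List
--
-- def simplifiedFractions(n: int) -> List[str]:
--     ans = []
--     for i in range(2, n + 1):
--         # j/i is reducible iff j is a multiple of some proper divisor d >= 2 of i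
--         bad = set()
--         for d in range(2, i):
--             if i % d == 0:
--                 bad.update(range(d, i, d))
--         ans += [f'{j}/{i}' for j in range(1, i) if j not in bad]
--     return ans
-- ===== Notes on version B (the rewrite author's own statement) =====
-- stated objective: faster
-- what changed: Instead of running the Euclidean gcd for every pair (i, j), B sieves per denominator i: it marks the multiples of each nontrivial proper divisor of i in a set and emits the unmarked numerators, dropping the per-pair logarithmic gcd loop.
import Mathlib
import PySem

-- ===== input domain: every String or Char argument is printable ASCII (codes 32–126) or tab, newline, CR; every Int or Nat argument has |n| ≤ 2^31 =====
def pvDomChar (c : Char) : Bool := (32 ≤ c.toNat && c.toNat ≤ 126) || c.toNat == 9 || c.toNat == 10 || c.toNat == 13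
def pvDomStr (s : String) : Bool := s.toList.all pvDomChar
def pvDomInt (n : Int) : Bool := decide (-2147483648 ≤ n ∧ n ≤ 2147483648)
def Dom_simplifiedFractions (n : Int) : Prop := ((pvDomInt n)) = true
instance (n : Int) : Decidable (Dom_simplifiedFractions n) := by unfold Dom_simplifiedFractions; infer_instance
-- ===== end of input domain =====

-- B replaces A's per-pair Euclidean-gcd test by a per-denominator divisor sieve:
-- multiples of each proper divisor of i are marked in a set, unmarked j are emitted
-- (objective: faster).

-- ===== PORT A =====
-- A's inner helper: `while y: x, y = y, x % y; return x` (Python %, sign of divisor)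
def pygcd (x y : Int) : Int :=
  if hy0 : y = 0 then x else pygcd y (PySem.Int.mod x y)
termination_by y.natAbs
decreasing_by
  rcases lt_or_gt_of_ne hy0 with hneg | hpos
  · have h1 := PySem.Int.mod_neg_bounds x hneg
    omega
  · have h1 := PySem.Int.mod_nonneg x hpos
    have h2 := PySem.Int.mod_lt x hpos
    omega

def simplifiedFractions (n : Int) : List String :=
  (PySem.List.pyRange 2 (n + 1) 1).foldl (fun ans i =>
    (PySem.List.pyRange 1 i 1).foldl (fun ans j =>
      if pygcd i j = 1 then ans ++ [PySem.Int.toStr j ++ "/" ++ PySem.Int.toStr i]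
      else ans) ans) []

-- ===== PORT B =====
def simplifiedFractions_alt (n : Int) : List String :=
  (PySem.List.pyRange 2 (n + 1) 1).foldl (fun ans i =>
    let bad : PySem.Set Int :=
      (PySem.List.pyRange 2 i 1).foldl (fun bad d =>
        if PySem.Int.mod i d = 0 then PySem.Set.update bad (PySem.List.pyRange d i d)
        else bad) PySem.Set.empty
    ans ++ ((PySem.List.pyRange 1 i 1).filter (fun j => !(PySem.Set.contains bad j))).map
      (fun j => PySem.Int.toStr j ++ "/" ++ PySem.Int.toStr i)) []

-- ===== PRECONDITION & SPEC =====
def Spec_simplifiedFractions (n : Int) (out : List String) : Prop := out = simplifiedFractions_alt n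
instance (n : Int) (out : List String) : Decidable (Spec_simplifiedFractions n out) := by unfold Spec_simplifiedFractions; infer_instance

-- ===== CLAIM (what is proved, stated in full; the proofs are below) =====
def Claim_equal_simplifiedFractions : Prop := ∀ (n : Int), Dom_simplifiedFractions n → Spec_simplifiedFractions n (simplifiedFractions n)

-- ===== LEMMAS AND PROOFS =====

-- A's gcd loop computes Nat.gcd on nonnegative inputs
theorem pygcd_natCast (b a : Nat) : pygcd (a : Int) (b : Int) = (Nat.gcd a b : Int) := by
  induction b using Nat.strong_induction_on generalizing a with
  | _ b ih =>
    rcases Nat.eq_zero_or_pos b with hb | hb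
    · subst hb; rw [pygcd]; simp
    · rw [pygcd]
      have hbne : (b : Int) ≠ 0 := by exact_mod_cast Nat.pos_iff_ne_zero.mp hb
      rw [dif_neg hbne, PySem.Int.mod_natCast]
      rw [ih (a % b) (Nat.mod_lt a hb) b]
      rw [Nat.gcd_comm b (a % b), ← Nat.gcd_rec, Nat.gcd_comm]

-- a common divisor 2 ≤ d ≤ b witnesses non-coprimality, and conversely
theorem gcd_one_iff_no_common (a b : Nat) (hb : 1 ≤ b) :
    Nat.gcd a b = 1 ↔ ∀ d : Nat, 2 ≤ d → d ≤ b → ¬(d ∣ a ∧ d ∣ b) := by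
  constructor
  · intro h d hd2 _ hdd
    have : d ∣ Nat.gcd a b := Nat.dvd_gcd hdd.1 hdd.2
    rw [h] at this
    have := Nat.le_of_dvd one_pos this
    omega
  · intro h
    by_contra hne
    have hdvd := Nat.gcd_dvd_right a b
    have hpos : 0 < Nat.gcd a b := Nat.gcd_pos_of_pos_right a (by omega)
    have hle : Nat.gcd a b ≤ b := Nat.le_of_dvd (by omega) hdvd
    exact h (Nat.gcd a b) (by omega) hle ⟨Nat.gcd_dvd_left a b, hdvd⟩

-- membership in the marking loop's set: some processed divisor d of i covers x
theorem mem_bad_foldl (i : Int) (l : List Int) (s : PySem.Set Int) (x : Int) :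
    x ∈ l.foldl (fun bad d =>
        if PySem.Int.mod i d = 0 then PySem.Set.update bad (PySem.List.pyRange d i d)
        else bad) s
      ↔ x ∈ s ∨ ∃ d ∈ l, PySem.Int.mod i d = 0 ∧ x ∈ PySem.List.pyRange d i d := by
  induction l generalizing s with
  | nil => simp
  | cons d t ih =>
    simp only [List.foldl_cons, List.mem_cons]
    split_ifs with hd
    · rw [ih, PySem.Set.mem_update]
      constructor
      · rintro ((hx | hx) | ⟨e, he, hp⟩)
        · exact Or.inl hx
        · exact Or.inr ⟨d, Or.inl rfl, hd, hx⟩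
        · exact Or.inr ⟨e, Or.inr he, hp⟩
      · rintro (hx | ⟨e, (rfl | he), hp⟩)
        · exact Or.inl (Or.inl hx)
        · exact Or.inl (Or.inr hp.2)
        · exact Or.inr ⟨e, he, hp⟩
    · rw [ih]
      constructor
      · rintro (hx | ⟨e, he, hp⟩)
        · exact Or.inl hx
        · exact Or.inr ⟨e, Or.inr he, hp⟩
      · rintro (hx | ⟨e, (rfl | he), hp⟩)
        · exact Or.inl hx
        · exact absurd hp.1 hd
        · exact Or.inr ⟨e, he, hp⟩

-- the two reducibility tests agree for 1 ≤ j < i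
theorem tests_agree (i j : Int) (h1 : 1 ≤ j) (h2 : j < i) :
    (decide (pygcd i j = 1)) =
      !(PySem.Set.contains
        ((PySem.List.pyRange 2 i 1).foldl (fun bad d =>
          if PySem.Int.mod i d = 0 then PySem.Set.update bad (PySem.List.pyRange d i d)
          else bad) PySem.Set.empty) j) := by
  have hi : (i.toNat : Int) = i := Int.toNat_of_nonneg (by omega)
  have hj : (j.toNat : Int) = j := Int.toNat_of_nonneg (by omega)
  have hg : pygcd i j = (Nat.gcd i.toNat j.toNat : Int) := by
    conv_lhs => rw [← hi, ← hj]
    rw [pygcd_natCast]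
  have hchar := gcd_one_iff_no_common i.toNat j.toNat (by omega)
  have hc : ∀ B : PySem.Set Int, PySem.Set.contains B j = decide (j ∈ B) := by
    intro B; simp [PySem.Set.contains]
  rw [hc, Bool.eq_iff_iff]
  simp only [decide_eq_true_eq, Bool.not_eq_true', decide_eq_false_iff_not]
  rw [mem_bad_foldl]
  rw [hg]
  constructor
  · intro h hmem
    have hgn : Nat.gcd i.toNat j.toNat = 1 := by exact_mod_cast h
    rcases hmem with hx | ⟨d, hdl, hdiv, hjm⟩
    · simp [PySem.Set.empty] at hx
    · rw [PySem.List.mem_pyRange_one] at hdl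
      rw [PySem.List.mem_pyRange_iff_of_pos (by omega : (0:Int) < d) j] at hjm
      have hdj : d ∣ j := by
        have : d ∣ (j - d) + d := Dvd.dvd.add hjm.2.2 dvd_rfl
        simpa using this
      have hdi : d ∣ i := (PySem.Int.mod_eq_zero_iff_dvd i d).mp hdiv
      have hdiN : (d.toNat : Int) ∣ (i.toNat : Int) := by
        rw [Int.toNat_of_nonneg (by omega : (0:Int) ≤ d), hi]; exact hdi
      have hdjN : (d.toNat : Int) ∣ (j.toNat : Int) := by
        rw [Int.toNat_of_nonneg (by omega : (0:Int) ≤ d), hj]; exact hdj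
      exact hchar.mp hgn d.toNat (by omega) (by omega)
        ⟨by exact_mod_cast hdiN, by exact_mod_cast hdjN⟩
  · intro h
    have hgn : Nat.gcd i.toNat j.toNat = 1 := by
      apply hchar.mpr
      intro d hd2 hdb hdd
      have hda : (d : Int) ∣ i := by
        have := Int.natCast_dvd_natCast.mpr hdd.1; rwa [hi] at this
      have hdb' : (d : Int) ∣ j := by
        have := Int.natCast_dvd_natCast.mpr hdd.2; rwa [hj] at this
      apply h
      refine Or.inr ⟨(d : Int), ?_, ?_, ?_⟩
      · rw [PySem.List.mem_pyRange_one]; omega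
      · exact (PySem.Int.mod_eq_zero_iff_dvd i d).mpr hda
      · rw [PySem.List.mem_pyRange_iff_of_pos (by omega : (0:Int) < (d:Int)) j]
        refine ⟨by omega, by omega, ?_⟩
        exact dvd_sub hdb' dvd_rfl
    exact_mod_cast hgn

-- ===== VERDICT (by name: the statement is the Claim_ definition above) =====
theorem simplifiedFractions_spec : Claim_equal_simplifiedFractions := by
  intro n _
  unfold Spec_simplifiedFractions simplifiedFractions
  have hinner : ∀ i ∈ PySem.List.pyRange 2 (n + 1) 1, ∀ ans : List String,
      (PySem.List.pyRange 1 i 1).foldl (fun ans j =>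
          if pygcd i j = 1 then ans ++ [PySem.Int.toStr j ++ "/" ++ PySem.Int.toStr i]
          else ans) ans
      = ans ++ ((PySem.List.pyRange 1 i 1).filter (fun j =>
            !(PySem.Set.contains
              ((PySem.List.pyRange 2 i 1).foldl (fun bad d =>
                if PySem.Int.mod i d = 0 then PySem.Set.update bad (PySem.List.pyRange d i d)
                else bad) PySem.Set.empty) j))).map
          (fun j => PySem.Int.toStr j ++ "/" ++ PySem.Int.toStr i) := by
    intro i _ ans
    rw [PySem.List.foldl_append_ite]
    congr 1
    congr 1
    apply List.filter_congr
    intro j hj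
    rw [PySem.List.mem_pyRange_one] at hj
    exact tests_agree i j hj.1 hj.2
  rw [PySem.List.foldl_congr_mem' (PySem.List.pyRange 2 (n + 1) 1)
    (fun ans i => (PySem.List.pyRange 1 i 1).foldl (fun ans j =>
        if pygcd i j = 1 then ans ++ [PySem.Int.toStr j ++ "/" ++ PySem.Int.toStr i]
        else ans) ans)
    (fun ans i => ans ++ ((PySem.List.pyRange 1 i 1).filter (fun j =>
        !(PySem.Set.contains
          ((PySem.List.pyRange 2 i 1).foldl (fun bad d =>
            if PySem.Int.mod i d = 0 then PySem.Set.update bad (PySem.List.pyRange d i d)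
            else bad) PySem.Set.empty) j))).map
      (fun j => PySem.Int.toStr j ++ "/" ++ PySem.Int.toStr i))
    [] hinner]
  rfl
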